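-- pv_equiv track=rewrite | github.com/rocketboosters/dftxt | dftxt/_io/_cast.py | _get_categorical_ordering
-- ===== SOURCE A (Python) =====
-- import typing
--
-- def _get_categorical_ordering(dftxt_data_type: str, values: typing.List[typing.Any]):
--     """Convert dftxt categorical dtype into stored category ordering."""
--     distinct = set(values)
--     available_indexed = [(values.index(v), v) for v in distinct]
--     raw = dftxt_data_type.split(":", 1)[-1]
--     if raw in ("az", "abc"):
--         return [x[1] for x in sorted(available_indexed, key=lambda v: v[1])]
--
--     if raw in ("za", "cba"):
--         return [
--             x[1] for x in sorted(available_indexed, key=lambda v: v[1], reverse=True)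
--         ]
--
--     raw_ordering = list(raw) if "," not in raw else raw.split(",")
--     indexes = [
--         int(v.strip()) if v.strip().isdigit() else v.strip() for v in raw_ordering
--     ]
--     appearance_ordered = list(sorted(available_indexed, key=lambda v: v[0]))
--     return [appearance_ordered[i][1] if isinstance(i, int) else i for i in indexes]
-- ===== SOURCE B (Python) =====
-- def _get_categorical_ordering(dftxt_data_type, values):
--     """Convert dftxt categorical dtype into stored category ordering."""
--     seen = {}
--     for v in values:
--         if v not in seen:
--             seen[v] = None
--     order = list(seen)  # distinct values in first-appearance order, one pass
--     raw = dftxt_data_type.split(":", 1)[-1]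
--     if raw in ("az", "abc"):
--         return sorted(order)
--     if raw in ("za", "cba"):
--         return sorted(order, reverse=True)
--     tokens = raw.split(",") if "," in raw else list(raw)
--     result = []
--     for t in tokens:
--         s = t.strip()
--         result.append(order[int(s)] if s.isdigit() else s)
--     return result
-- ===== Notes on version B (the rewrite author's own statement) =====
-- stated objective: faster
-- what changed: B replaces A's set() plus a values.index scan per distinct value (and the sort by first index) with a single pass over values building an insertion-ordered dict whose keys are already the appearance-ordered distinct values.
import Mathlib
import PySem

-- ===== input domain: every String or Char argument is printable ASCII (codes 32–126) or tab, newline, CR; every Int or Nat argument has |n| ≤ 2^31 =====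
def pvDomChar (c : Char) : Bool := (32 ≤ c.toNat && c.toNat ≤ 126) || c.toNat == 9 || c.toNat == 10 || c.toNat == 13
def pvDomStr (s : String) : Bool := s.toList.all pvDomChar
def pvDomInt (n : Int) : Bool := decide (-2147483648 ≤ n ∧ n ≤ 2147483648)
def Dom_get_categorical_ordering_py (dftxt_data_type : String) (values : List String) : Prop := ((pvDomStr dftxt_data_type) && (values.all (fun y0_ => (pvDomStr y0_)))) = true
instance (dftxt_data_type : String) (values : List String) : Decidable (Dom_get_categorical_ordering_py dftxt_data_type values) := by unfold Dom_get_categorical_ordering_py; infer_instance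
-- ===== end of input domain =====

-- B replaces A's per-distinct-value `values.index` scans (and the sort by first index) by one
-- dict pass collecting first occurrences in order; return value only, no argument is mutated.

-- ===== PORT A =====
def get_categorical_ordering_py (dftxt_data_type : String) (values : List String) : List String :=
  let distinct := PySem.Set.ofList values
  let available_indexed : List (Int × String) :=
    distinct.map (fun v => (((PySem.List.index? values v).getD 0 : Int), v))
  let raw := (PySem.List.pyGet? ((PySem.Str.splitMax? dftxt_data_type ":" 1).getD []) (-1)).getD ""
  if raw = "az" ∨ raw = "abc" then
    (PySem.List.sorted available_indexed (fun v => v.2) false).map (fun x => x.2)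
  else if raw = "za" ∨ raw = "cba" then
    (PySem.List.sorted available_indexed (fun v => v.2) true).map (fun x => x.2)
  else
    let raw_ordering : List String :=
      if PySem.Str.isIn "," raw then (PySem.Str.split? raw ",").getD []
      else raw.toList.map (fun c => String.ofList [c])
    let indexes : List (Int ⊕ String) := raw_ordering.map (fun v =>
      if PySem.Str.strIsdigit (PySem.Str.strip v) then
        Sum.inl ((PySem.Int.ofStr? (PySem.Str.strip v)).getD 0)
      else Sum.inr (PySem.Str.strip v))
    let appearance_ordered := PySem.List.sorted available_indexed (fun v => v.1) false
    -- appearance_ordered[i] raises IndexError out of range; Pre_ excludes that, .getD "" is arbitrary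
    indexes.map (fun i => match i with
      | Sum.inl n => ((PySem.List.pyGet? appearance_ordered n).map (fun x => x.2)).getD ""
      | Sum.inr s => s)

-- ===== PORT B =====
def get_categorical_ordering_py_alt (dftxt_data_type : String) (values : List String) : List String :=
  let seen := values.foldl
    (fun (d : PySem.Dict String Unit) v => if d.contains v then d else d.insert v ()) PySem.Dict.empty
  let order := seen.keys
  let raw := (PySem.List.pyGet? ((PySem.Str.splitMax? dftxt_data_type ":" 1).getD []) (-1)).getD ""
  if raw = "az" ∨ raw = "abc" then
    PySem.List.sorted order (fun x => x) false
  else if raw = "za" ∨ raw = "cba" then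
    PySem.List.sorted order (fun x => x) true
  else
    let tokens : List String :=
      if PySem.Str.isIn "," raw then (PySem.Str.split? raw ",").getD []
      else raw.toList.map (fun c => String.ofList [c])
    -- order[int(s)] raises IndexError out of range; Pre_ excludes that, .getD "" is arbitrary
    tokens.foldl (fun acc t =>
      acc ++ [if PySem.Str.strIsdigit (PySem.Str.strip t) then
                (PySem.List.pyGet? order ((PySem.Int.ofStr? (PySem.Str.strip t)).getD 0)).getD ""
              else PySem.Str.strip t]) []

-- ===== PRECONDITION & SPEC =====
-- Pre_ excludes exactly the inputs where Python A raises IndexError: an explicit ordering that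
-- contains a numeric position ≥ the number of distinct values (B raises there too).
def Pre_get_categorical_ordering_py (dftxt_data_type : String) (values : List String) : Prop :=
  (PySem.List.pyGet? ((PySem.Str.splitMax? dftxt_data_type ":" 1).getD []) (-1)).getD "" = "az" ∨
  (PySem.List.pyGet? ((PySem.Str.splitMax? dftxt_data_type ":" 1).getD []) (-1)).getD "" = "abc" ∨
  (PySem.List.pyGet? ((PySem.Str.splitMax? dftxt_data_type ":" 1).getD []) (-1)).getD "" = "za" ∨
  (PySem.List.pyGet? ((PySem.Str.splitMax? dftxt_data_type ":" 1).getD []) (-1)).getD "" = "cba" ∨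
  (∀ t ∈ (if PySem.Str.isIn ","
            ((PySem.List.pyGet? ((PySem.Str.splitMax? dftxt_data_type ":" 1).getD []) (-1)).getD "")
          then (PySem.Str.split?
            ((PySem.List.pyGet? ((PySem.Str.splitMax? dftxt_data_type ":" 1).getD []) (-1)).getD "") ",").getD []
          else ((PySem.List.pyGet? ((PySem.Str.splitMax? dftxt_data_type ":" 1).getD []) (-1)).getD "").toList.map
            (fun c => String.ofList [c])),
      PySem.Str.strIsdigit (PySem.Str.strip t) = true →
        (PySem.Int.ofStr? (PySem.Str.strip t)).getD 0 < ((PySem.Set.ofList values).length : Int))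
instance (dftxt_data_type : String) (values : List String) : Decidable (Pre_get_categorical_ordering_py dftxt_data_type values) := by unfold Pre_get_categorical_ordering_py; infer_instance

def pvWitness_get_categorical_ordering_py : String × List String := ("category:1,0", ["b", "a", "b"])

def Spec_get_categorical_ordering_py (dftxt_data_type : String) (values : List String) (out : List String) : Prop := out = get_categorical_ordering_py_alt dftxt_data_type values
instance (dftxt_data_type : String) (values : List String) (out : List String) : Decidable (Spec_get_categorical_ordering_py dftxt_data_type values out) := by unfold Spec_get_categorical_ordering_py; infer_instance

-- ===== CLAIM (what is proved, stated in full; the proofs are below) =====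
def Claim_equal_get_categorical_ordering_py : Prop := ∀ (dftxt_data_type : String) (values : List String), Dom_get_categorical_ordering_py dftxt_data_type values → Pre_get_categorical_ordering_py dftxt_data_type values → Spec_get_categorical_ordering_py dftxt_data_type values (get_categorical_ordering_py dftxt_data_type values)

-- ===== LEMMAS AND PROOFS =====

-- B's one-pass dict of first occurrences has exactly set(values) (first occurrences, in order) as keys.
lemma pvKeysFold (l : List String) (d : PySem.Dict String Unit) :
    (l.foldl (fun d v => if d.contains v then d else d.insert v ()) d).keys
      = l.foldl PySem.Set.add d.keys := by
  induction l generalizing d with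
  | nil => rfl
  | cons v l ih =>
    simp only [List.foldl_cons]
    rw [ih]
    congr 1
    by_cases h : d.contains v = true
    · have hv : v ∈ d.keys := (PySem.Dict.contains_iff_mem_keys d v).mp h
      simp [h, PySem.Set.add, hv]
    · have h2 : d.contains v = false := by simpa using h
      have hv : v ∉ d.keys := fun hm => by
        simp [(PySem.Dict.contains_iff_mem_keys d v).mpr hm] at h2
      simp [h2, PySem.Dict.keys_insert_of_not_contains d () h2, PySem.Set.add, hv]

-- set(values) is in strictly increasing order of first-occurrence index.
lemma pvIdxPairwise (values : List String) :
    (PySem.Set.ofList values).Pairwise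
      (fun a b => (((PySem.List.index? values a).getD 0 : Nat) : Int)
                < (((PySem.List.index? values b).getD 0 : Nat) : Int)) := by
  induction values using List.reverseRecOn with
  | nil => simp [PySem.Set.ofList]
  | append_singleton xs x ih =>
    have hof : PySem.Set.ofList (xs ++ [x]) = PySem.Set.add (PySem.Set.ofList xs) x := by
      simp [PySem.Set.ofList_eq_foldl, List.foldl_append]
    rw [hof]
    have hidx : ∀ a ∈ PySem.Set.ofList xs,
        PySem.List.index? (xs ++ [x]) a = PySem.List.index? xs a := fun a ha =>
      PySem.List.index?_append_of_mem _ ((PySem.Set.mem_ofList xs a).mp ha)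
    by_cases hx : x ∈ xs
    · have hadd : PySem.Set.add (PySem.Set.ofList xs) x = PySem.Set.ofList xs := by
        simp [PySem.Set.add, hx]
      rw [hadd]
      exact ih.imp_of_mem (fun {a b} ha hb hab => by rwa [hidx a ha, hidx b hb])
    · have hadd : PySem.Set.add (PySem.Set.ofList xs) x = PySem.Set.ofList xs ++ [x] := by
        simp [PySem.Set.add, hx]
      rw [hadd, List.pairwise_append]
      refine ⟨ih.imp_of_mem (fun {a b} ha hb hab => by rwa [hidx a ha, hidx b hb]),
        List.pairwise_singleton _ _, ?_⟩
      intro a ha b hb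
      rw [List.mem_singleton] at hb
      rw [hb]
      have hlast := PySem.List.index?_append_singleton_self xs x hx
      rw [hidx a ha, hlast]
      have hax : a ∈ xs := (PySem.Set.mem_ofList xs a).mp ha
      obtain ⟨k, hk⟩ := Option.isSome_iff_exists.mp ((PySem.List.index?_isSome_iff xs a).mpr hax)
      obtain ⟨pre, suf, hxs, hlen, -⟩ := (PySem.List.index?_eq_some_iff xs a k).mp hk
      have hklt : k < xs.length := by subst hxs; simp [← hlen]
      rw [hk]
      simp only [Option.getD_some]
      exact_mod_cast hklt

-- A's sort by first index is a no-op: the distinct list is already in appearance order.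
lemma pvAppearance (values : List String) :
    PySem.List.sorted
        ((PySem.Set.ofList values).map
          (fun v => (((PySem.List.index? values v).getD 0 : Int), v))) (fun v => v.1) false
      = (PySem.Set.ofList values).map
          (fun v => (((PySem.List.index? values v).getD 0 : Int), v)) := by
  refine PySem.List.sorted_eq_of_perm_of_pairwise_lt _ _ _ (List.Perm.refl _) ?_
  rw [List.pairwise_map]
  exact pvIdxPairwise values

lemma pvPyGetMap {α β : Type} (f : α → β) (l : List α) (i : Int) :
    PySem.List.pyGet? (l.map f) i = (PySem.List.pyGet? l i).map f := by
  simp [PySem.List.pyGet?, PySem.List.pyIdx?]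

lemma pvMapSnd (values : List String) :
    ((PySem.Set.ofList values).map
      (fun v => (((PySem.List.index? values v).getD 0 : Int), v))).map (fun x => x.2)
      = PySem.Set.ofList values := by
  simp [List.map_map, Function.comp_def]

-- ===== VERDICT (by name: the statement is the Claim_ definition above) =====
theorem get_categorical_ordering_py_spec : Claim_equal_get_categorical_ordering_py := by
  intro dt values _hdom _hpre
  unfold Spec_get_categorical_ordering_py
  unfold get_categorical_ordering_py get_categorical_ordering_py_alt
  simp only []
  rw [pvKeysFold values PySem.Dict.empty]
  rw [show (PySem.Dict.empty : PySem.Dict String Unit).keys = [] from rfl]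
  rw [← PySem.Set.ofList_eq_foldl]
  split_ifs with h1 h2 hc
  · -- ascending: both are the unique ≤-sorted permutation of the distinct values
    refine List.Perm.eq_of_pairwise (le := (· ≤ ·))
      (fun a b _ _ hab hba => le_antisymm hab hba) ?_ ?_ ?_
    · rw [List.pairwise_map]; exact PySem.List.sorted_pairwise _ _
    · simpa using PySem.List.sorted_pairwise (PySem.Set.ofList values) (fun x => x)
    · refine List.Perm.trans
        (((PySem.List.sorted_perm _ (fun v : Int × String => v.2) false).map _).trans ?_)
        (PySem.List.sorted_perm (PySem.Set.ofList values) (fun x => x) false).symm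
      rw [pvMapSnd values]
  · -- descending: same with the reversed order
    refine List.Perm.eq_of_pairwise (le := fun a b => b ≤ a)
      (fun a b _ _ hab hba => le_antisymm hba hab) ?_ ?_ ?_
    · rw [List.pairwise_map]; exact PySem.List.sorted_pairwise_rev _ _
    · simpa using PySem.List.sorted_pairwise_rev (PySem.Set.ofList values) (fun x => x)
    · refine List.Perm.trans
        (((PySem.List.sorted_perm _ (fun v : Int × String => v.2) true).map _).trans ?_)
        (PySem.List.sorted_perm (PySem.Set.ofList values) (fun x => x) true).symm
      rw [pvMapSnd values]
  · -- explicit ordering, comma-separated tokens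
    rw [pvAppearance values]
    rw [show (∀ (g : String → String) (tokens : List String),
          tokens.foldl (fun acc t => acc ++ [g t]) [] = tokens.map g) from
        fun g tokens => by simpa using PySem.List.foldl_append_singleton_eq_map g tokens []]
    rw [List.map_map]
    refine List.map_congr_left (fun t _ => ?_)
    simp only [Function.comp]
    split_ifs with hd
    · simp [pvPyGetMap, Option.map_map, Function.comp_def]
    · rfl
  · -- explicit ordering, single-character tokens
    rw [pvAppearance values]
    rw [show (∀ (g : String → String) (tokens : List String),
          tokens.foldl (fun acc t => acc ++ [g t]) [] = tokens.map g) from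
        fun g tokens => by simpa using PySem.List.foldl_append_singleton_eq_map g tokens []]
    rw [List.map_map]
    refine List.map_congr_left (fun t _ => ?_)
    simp only [Function.comp]
    split_ifs with hd
    · simp [pvPyGetMap, Option.map_map, Function.comp_def]
    · rfl
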